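-- pv_equiv track=rewrite | github.com/JOmarCuenca/SubnetCalculator | Subnet.py | transform_bits
-- ===== SOURCE A (Python) =====
-- def transform_bits(string):
--     if (len(string) < 32):
--         return "error"
--     else:
--         cont = 0
--         res = ""
--         while (cont < 32):
--             if (cont in [8, 16, 24]):
--                 res += '.'
--             res += string[cont]
--             cont += 1
--         return res
-- ===== SOURCE B (Python) =====
-- def transform_bits(string):
--     if len(string) < 32:
--         return "error"
--     else:
--         return '.'.join([string[0:8], string[8:16], string[16:24], string[24:32]])
-- ===== Notes on version B (the rewrite author's own statement) =====
-- stated objective: simpler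
-- what changed: Replaces the per-character while loop that tests boundary indices and accumulates one character at a time with a direct '.'.join of the four fixed 8-character slices string[0:8], string[8:16], string[16:24], string[24:32].
import Mathlib
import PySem

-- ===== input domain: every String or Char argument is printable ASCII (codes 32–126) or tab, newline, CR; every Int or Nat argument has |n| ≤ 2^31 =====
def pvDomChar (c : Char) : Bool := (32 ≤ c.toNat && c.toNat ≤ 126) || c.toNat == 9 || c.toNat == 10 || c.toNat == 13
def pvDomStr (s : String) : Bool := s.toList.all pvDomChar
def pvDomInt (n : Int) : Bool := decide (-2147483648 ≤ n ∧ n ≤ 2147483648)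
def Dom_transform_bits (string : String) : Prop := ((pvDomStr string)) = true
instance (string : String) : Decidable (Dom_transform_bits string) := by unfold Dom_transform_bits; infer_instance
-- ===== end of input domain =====

-- B replaces A's per-character accumulation loop by joining the four fixed 8-character slices with '.': simpler, same result.

-- ===== PORT A =====
-- A: guard len < 32, then a while loop over cont = 0..31 appending '.' before indices 8, 16, 24
-- and string[cont] at each step (ported as a fold over range(0, 32); string[cont] is in range by the guard).
def transform_bits (string : String) : String :=
  if PySem.Str.len string < 32 then "error"
  else
    String.ofList <|
      (PySem.List.pyRange 0 32 1).foldl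
        (fun res cont =>
          (if cont = 8 ∨ cont = 16 ∨ cont = 24 then res ++ ['.'] else res)
            ++ [PySem.List.pyGetD string.toList cont ' ']) []

-- ===== PORT B =====
-- B: same guard, then '.'.join([string[0:8], string[8:16], string[16:24], string[24:32]]).
def transform_bits_alt (string : String) : String :=
  if PySem.Str.len string < 32 then "error"
  else
    String.ofList <| PySem.Chars.join ['.']
      [PySem.List.slice string.toList (some 0) (some 8),
       PySem.List.slice string.toList (some 8) (some 16),
       PySem.List.slice string.toList (some 16) (some 24),
       PySem.List.slice string.toList (some 24) (some 32)]

-- ===== PRECONDITION & SPEC =====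
def Spec_transform_bits (string : String) (out : String) : Prop := out = transform_bits_alt string
instance (string : String) (out : String) : Decidable (Spec_transform_bits string out) := by unfold Spec_transform_bits; infer_instance

-- ===== CLAIM (what is proved, stated in full; the proofs are below) =====
def Claim_equal_transform_bits : Prop := ∀ (string : String), Dom_transform_bits string → Spec_transform_bits string (transform_bits string)

-- ===== LEMMAS AND PROOFS =====

-- A's loop on an explicitly decomposed list of ≥ 32 characters evaluates to the dotted literal list.
theorem pv_loopA (c0 c1 c2 c3 c4 c5 c6 c7 c8 c9 c10 c11 c12 c13 c14 c15 c16 c17 c18 c19 c20 c21 c22 c23 c24 c25 c26 c27 c28 c29 c30 c31 : Char) (rest : List Char) :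
    (PySem.List.pyRange 0 32 1).foldl
      (fun res cont => (if cont = 8 ∨ cont = 16 ∨ cont = 24 then res ++ ['.'] else res)
        ++ [PySem.List.pyGetD (c0::c1::c2::c3::c4::c5::c6::c7::c8::c9::c10::c11::c12::c13::c14::c15::c16::c17::c18::c19::c20::c21::c22::c23::c24::c25::c26::c27::c28::c29::c30::c31::rest) cont ' ']) []
    = [c0, c1, c2, c3, c4, c5, c6, c7, '.', c8, c9, c10, c11, c12, c13, c14, c15, '.', c16, c17, c18, c19, c20, c21, c22, c23, '.', c24, c25, c26, c27, c28, c29, c30, c31] := by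
  have hr : PySem.List.pyRange 0 32 1 = [0, 1, 2, 3, 4, 5, 6, 7, 8, 9, 10, 11, 12, 13, 14, 15, 16, 17, 18, 19, 20, 21, 22, 23, 24, 25, 26, 27, 28, 29, 30, 31] := by decide
  rw [hr]
  norm_num [PySem.List.pyGetD_ofNat']

-- B's slice-join on the same decomposed list evaluates to the same literal list.
theorem pv_joinB (c0 c1 c2 c3 c4 c5 c6 c7 c8 c9 c10 c11 c12 c13 c14 c15 c16 c17 c18 c19 c20 c21 c22 c23 c24 c25 c26 c27 c28 c29 c30 c31 : Char) (rest : List Char) :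
    PySem.Chars.join ['.']
      [PySem.List.slice (c0::c1::c2::c3::c4::c5::c6::c7::c8::c9::c10::c11::c12::c13::c14::c15::c16::c17::c18::c19::c20::c21::c22::c23::c24::c25::c26::c27::c28::c29::c30::c31::rest) (some 0) (some 8),
       PySem.List.slice (c0::c1::c2::c3::c4::c5::c6::c7::c8::c9::c10::c11::c12::c13::c14::c15::c16::c17::c18::c19::c20::c21::c22::c23::c24::c25::c26::c27::c28::c29::c30::c31::rest) (some 8) (some 16),
       PySem.List.slice (c0::c1::c2::c3::c4::c5::c6::c7::c8::c9::c10::c11::c12::c13::c14::c15::c16::c17::c18::c19::c20::c21::c22::c23::c24::c25::c26::c27::c28::c29::c30::c31::rest) (some 16) (some 24),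
       PySem.List.slice (c0::c1::c2::c3::c4::c5::c6::c7::c8::c9::c10::c11::c12::c13::c14::c15::c16::c17::c18::c19::c20::c21::c22::c23::c24::c25::c26::c27::c28::c29::c30::c31::rest) (some 24) (some 32)]
    = [c0, c1, c2, c3, c4, c5, c6, c7, '.', c8, c9, c10, c11, c12, c13, c14, c15, '.', c16, c17, c18, c19, c20, c21, c22, c23, '.', c24, c25, c26, c27, c28, c29, c30, c31] := by
  norm_num [PySem.List.slice_toNat, PySem.Chars.join, List.intercalate]
  simp [show (8:Int).toNat = 8 from rfl, show (16:Int).toNat = 16 from rfl,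
        show (24:Int).toNat = 24 from rfl, show (32:Int).toNat = 32 from rfl]

-- On any character list of length ≥ 32 the two bodies agree.
theorem pv_body (cs : List Char) (h : 32 ≤ cs.length) :
    (PySem.List.pyRange 0 32 1).foldl
      (fun res cont => (if cont = 8 ∨ cont = 16 ∨ cont = 24 then res ++ ['.'] else res)
        ++ [PySem.List.pyGetD cs cont ' ']) []
    = PySem.Chars.join ['.']
        [PySem.List.slice cs (some 0) (some 8),
         PySem.List.slice cs (some 8) (some 16),
         PySem.List.slice cs (some 16) (some 24),
         PySem.List.slice cs (some 24) (some 32)] := by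
  obtain ⟨t, r, ht, rfl⟩ : ∃ t r, t.length = 32 ∧ cs = t ++ r :=
    ⟨cs.take 32, cs.drop 32, by simp; omega, (cs.take_append_drop 32).symm⟩
  rcases t with _ | ⟨c0, t⟩
  · simp at ht
  rcases t with _ | ⟨c1, t⟩
  · simp at ht
  rcases t with _ | ⟨c2, t⟩
  · simp at ht
  rcases t with _ | ⟨c3, t⟩
  · simp at ht
  rcases t with _ | ⟨c4, t⟩
  · simp at ht
  rcases t with _ | ⟨c5, t⟩
  · simp at ht
  rcases t with _ | ⟨c6, t⟩
  · simp at ht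
  rcases t with _ | ⟨c7, t⟩
  · simp at ht
  rcases t with _ | ⟨c8, t⟩
  · simp at ht
  rcases t with _ | ⟨c9, t⟩
  · simp at ht
  rcases t with _ | ⟨c10, t⟩
  · simp at ht
  rcases t with _ | ⟨c11, t⟩
  · simp at ht
  rcases t with _ | ⟨c12, t⟩
  · simp at ht
  rcases t with _ | ⟨c13, t⟩
  · simp at ht
  rcases t with _ | ⟨c14, t⟩
  · simp at ht
  rcases t with _ | ⟨c15, t⟩
  · simp at ht
  rcases t with _ | ⟨c16, t⟩
  · simp at ht
  rcases t with _ | ⟨c17, t⟩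
  · simp at ht
  rcases t with _ | ⟨c18, t⟩
  · simp at ht
  rcases t with _ | ⟨c19, t⟩
  · simp at ht
  rcases t with _ | ⟨c20, t⟩
  · simp at ht
  rcases t with _ | ⟨c21, t⟩
  · simp at ht
  rcases t with _ | ⟨c22, t⟩
  · simp at ht
  rcases t with _ | ⟨c23, t⟩
  · simp at ht
  rcases t with _ | ⟨c24, t⟩
  · simp at ht
  rcases t with _ | ⟨c25, t⟩
  · simp at ht
  rcases t with _ | ⟨c26, t⟩
  · simp at ht
  rcases t with _ | ⟨c27, t⟩
  · simp at ht
  rcases t with _ | ⟨c28, t⟩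
  · simp at ht
  rcases t with _ | ⟨c29, t⟩
  · simp at ht
  rcases t with _ | ⟨c30, t⟩
  · simp at ht
  rcases t with _ | ⟨c31, t⟩
  · simp at ht
  simp only [List.length_cons] at ht
  have ht0 : t = [] := List.length_eq_zero_iff.mp (by omega)
  subst ht0
  simp only [List.cons_append, List.nil_append]
  exact (pv_loopA c0 c1 c2 c3 c4 c5 c6 c7 c8 c9 c10 c11 c12 c13 c14 c15 c16 c17 c18 c19 c20 c21 c22 c23 c24 c25 c26 c27 c28 c29 c30 c31 r).trans (pv_joinB c0 c1 c2 c3 c4 c5 c6 c7 c8 c9 c10 c11 c12 c13 c14 c15 c16 c17 c18 c19 c20 c21 c22 c23 c24 c25 c26 c27 c28 c29 c30 c31 r).symm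

-- ===== VERDICT (by name: the statement is the Claim_ definition above) =====
theorem transform_bits_spec : Claim_equal_transform_bits := by
  intro s _
  unfold Spec_transform_bits transform_bits transform_bits_alt
  by_cases h : PySem.Str.len s < 32
  · rw [if_pos h, if_pos h]
  · rw [if_neg h, if_neg h]
    exact congrArg String.ofList (pv_body s.toList (by
      rw [PySem.Str.len_eq] at h
      omega))
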